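-- pv_equiv track=rewrite | github.com/r41k0u/pycloud | src/policy/vmm.py | find_gpu_blocks
-- ===== SOURCE A (Python) =====
-- def find_gpu_blocks(profile: tuple[int, int], gpu: set[int, ...]) -> list[set[int], ...]:
--     result = []
--     _, num_memory_blocks = profile
--     for start in gpu:
--         blocks = set(range(start, start + num_memory_blocks))
--         if blocks.issubset(gpu):
--             result.append(blocks)
--     return result
-- ===== SOURCE B (Python) =====
-- def find_gpu_blocks(profile: tuple[int, int], gpu: set[int, ...]) -> list[set[int], ...]:
--     _, num_memory_blocks = profile
--     # run-length table: run[x] = how many consecutive ints x, x+1, ... are in gpu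
--     run = {}
--     for x in sorted(gpu, reverse=True):
--         run[x] = run.get(x + 1, 0) + 1
--     result = []
--     for start in gpu:
--         if run.get(start, 0) >= num_memory_blocks:
--             result.append(set(range(start, start + num_memory_blocks)))
--     return result
-- ===== Notes on version B (the rewrite author's own statement) =====
-- stated objective: faster
-- what changed: Replaces A's per-start construction of the whole candidate range and O(len) subset scan by a run-length table (run[x] = length of the consecutive run starting at x, filled once over gpu sorted descending), so each start is decided by one O(1) table lookup; Pre_ restricts gpu to duplicate-free lists, the only lists that encode a Python set (the parameter's declared type).
import Mathlib
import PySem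

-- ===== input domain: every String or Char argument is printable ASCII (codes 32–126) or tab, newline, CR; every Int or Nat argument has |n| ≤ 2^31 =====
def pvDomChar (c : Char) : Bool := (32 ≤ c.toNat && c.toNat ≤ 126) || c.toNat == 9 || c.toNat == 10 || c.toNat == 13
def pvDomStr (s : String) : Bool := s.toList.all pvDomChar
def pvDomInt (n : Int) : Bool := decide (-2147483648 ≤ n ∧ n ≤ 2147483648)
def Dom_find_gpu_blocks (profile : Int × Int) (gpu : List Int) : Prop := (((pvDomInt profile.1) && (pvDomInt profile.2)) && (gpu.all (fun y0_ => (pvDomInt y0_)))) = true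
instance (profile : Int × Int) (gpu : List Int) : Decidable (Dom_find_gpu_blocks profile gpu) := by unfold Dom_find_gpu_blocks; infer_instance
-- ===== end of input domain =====

-- B replaces A's per-start O(k) subset scan by a precomputed run-length table over gpu
-- (objective: faster on inputs with many long candidate runs; same results, same order).

-- ===== PORT A =====
def find_gpu_blocks (profile : Int × Int) (gpu : List Int) : List (List Int) :=
  let num_memory_blocks := profile.2
  gpu.foldl (fun result start =>
    let blocks := PySem.Set.ofList (PySem.List.pyRange start (start + num_memory_blocks) 1)
    if PySem.Set.issubset blocks gpu then result ++ [blocks] else result) []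

-- ===== PORT B =====
def find_gpu_blocks_alt (profile : Int × Int) (gpu : List Int) : List (List Int) :=
  let num_memory_blocks := profile.2
  let run : PySem.Dict Int Int :=
    (PySem.List.sorted gpu (fun x => x) true).foldl
      (fun d x => d.insert x (d.getD (x + 1) 0 + 1)) PySem.Dict.empty
  gpu.foldl (fun result start =>
    if num_memory_blocks ≤ run.getD start 0 then
      result ++ [PySem.Set.ofList (PySem.List.pyRange start (start + num_memory_blocks) 1)]
    else result) []

-- ===== PRECONDITION & SPEC =====
-- gpu is a Python set: Pre_ restricts to lists that actually encode one (no duplicate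
-- elements); a duplicate-bearing list is not a value of the Python parameter's type.
def Pre_find_gpu_blocks (profile : Int × Int) (gpu : List Int) : Prop := gpu.Nodup
instance (profile : Int × Int) (gpu : List Int) : Decidable (Pre_find_gpu_blocks profile gpu) := by unfold Pre_find_gpu_blocks; infer_instance
def pvWitness_find_gpu_blocks : (Int × Int) × List Int := ((0, 2), [0, 1, 3])

def Spec_find_gpu_blocks (profile : Int × Int) (gpu : List Int) (out : List (List Int)) : Prop := out = find_gpu_blocks_alt profile gpu
instance (profile : Int × Int) (gpu : List Int) (out : List (List Int)) : Decidable (Spec_find_gpu_blocks profile gpu out) := by unfold Spec_find_gpu_blocks; infer_instance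

-- ===== CLAIM (what is proved, stated in full; the proofs are below) =====
def Claim_equal_find_gpu_blocks : Prop := ∀ (profile : Int × Int) (gpu : List Int), Dom_find_gpu_blocks profile gpu → Pre_find_gpu_blocks profile gpu → Spec_find_gpu_blocks profile gpu (find_gpu_blocks profile gpu)

-- ===== LEMMAS AND PROOFS =====

-- The run-table fold invariant: processing a strictly decreasing list L of elements of G,
-- starting from a dict whose keys are exactly the already-processed elements G \ L (all
-- larger than every element of L), with the streak recurrence and positivity.
theorem run_fold_inv (G : List Int) :
    ∀ (L : List Int) (d : PySem.Dict Int Int),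
      (∀ y ∈ L, y ∈ G) →
      L.Pairwise (fun a b => b < a) →
      (∀ y : Int, (d.get? y).isSome = true ↔ (y ∈ G ∧ y ∉ L)) →
      (∀ y ∈ G, y ∉ L → ∀ z ∈ L, z < y) →
      (∀ y ∈ G, y ∉ L → d.getD y 0 = d.getD (y + 1) 0 + 1) →
      (∀ (y v : Int), d.get? y = some v → 1 ≤ v) →
      ((∀ y : Int, ((L.foldl (fun d x => d.insert x (d.getD (x + 1) 0 + 1)) d).get? y).isSome = true ↔ y ∈ G) ∧
       (∀ y ∈ G, (L.foldl (fun d x => d.insert x (d.getD (x + 1) 0 + 1)) d).getD y 0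
           = (L.foldl (fun d x => d.insert x (d.getD (x + 1) 0 + 1)) d).getD (y + 1) 0 + 1) ∧
       (∀ (y v : Int), (L.foldl (fun d x => d.insert x (d.getD (x + 1) 0 + 1)) d).get? y = some v → 1 ≤ v)) := by
  intro L
  induction L with
  | nil =>
    intro d hLG hdec hproc hgt hrec hpos
    refine ⟨fun y => ?_, fun y hy => hrec y hy (by simp), hpos⟩
    simpa using hproc y
  | cons x rest ih =>
    intro d hLG hdec hproc hgt hrec hpos
    have hxG : x ∈ G := hLG x (by simp)
    have hrest_lt : ∀ z ∈ rest, z < x := by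
      have := List.pairwise_cons.mp hdec
      exact this.1
    have hxrest : x ∉ rest := fun hx => lt_irrefl x (hrest_lt x hx)
    simp only [List.foldl_cons]
    set d1 := d.insert x (d.getD (x + 1) 0 + 1) with hd1
    apply ih d1
    · intro y hy; exact hLG y (by simp [hy])
    · exact (List.pairwise_cons.mp hdec).2
    · intro y
      by_cases hyx : y = x
      · subst hyx
        simp [hd1, PySem.Dict.get?_insert_self, hxG, hxrest]
      · rw [hd1, PySem.Dict.get?_insert_of_ne _ _ hyx, hproc y]
        constructor
        · rintro ⟨h1, h2⟩; exact ⟨h1, fun hy => h2 (by simp [hy])⟩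
        · rintro ⟨h1, h2⟩; refine ⟨h1, fun hy => ?_⟩
          rcases List.mem_cons.mp hy with h | h
          · exact hyx h
          · exact h2 h
    · intro y hyG hyrest z hz
      by_cases hyx : y = x
      · subst hyx; exact hrest_lt z hz
      · have hyL : y ∉ x :: rest := by
          intro hy; rcases List.mem_cons.mp hy with h | h
          · exact hyx h
          · exact hyrest h
        exact hgt y hyG hyL z (by simp [hz])
    · intro y hyG hyrest
      by_cases hyx : y = x
      · subst hyx
        have hne : y + 1 ≠ y := by omega
        rw [hd1, PySem.Dict.getD_insert_self, PySem.Dict.getD_insert_of_ne _ _ _ hne]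
      · have hyL : y ∉ x :: rest := by
          intro hy; rcases List.mem_cons.mp hy with h | h
          · exact hyx h
          · exact hyrest h
        have hx_lt_y : x < y := hgt y hyG hyL x (by simp)
        have hne1 : y + 1 ≠ x := by omega
        rw [hd1, PySem.Dict.getD_insert_of_ne _ _ _ hyx, PySem.Dict.getD_insert_of_ne _ _ _ hne1]
        exact hrec y hyG hyL
    · intro y v hv
      by_cases hyx : y = x
      · subst hyx
        rw [hd1, PySem.Dict.get?_insert_self] at hv
        have h0 : 0 ≤ d.getD (y + 1) 0 := by
          rw [PySem.Dict.getD_eq_get?_getD]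
          cases h : d.get? (y + 1) with
          | none => simp
          | some w => have h1 := hpos _ _ h; simp only [Option.getD_some]; omega
        have h2 := Option.some.inj hv
        omega
      · rw [hd1, PySem.Dict.get?_insert_of_ne _ _ hyx] at hv
        exact hpos y v hv

-- B's run-length table (the fold B performs), named for the lemmas below.
def runTable (gpu : List Int) : PySem.Dict Int Int :=
  (PySem.List.sorted gpu (fun x => x) true).foldl
    (fun d x => d.insert x (d.getD (x + 1) 0 + 1)) PySem.Dict.empty

theorem runTable_props (gpu : List Int) (hnd : gpu.Nodup) :
    (∀ y : Int, ((runTable gpu).get? y).isSome = true ↔ y ∈ gpu) ∧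
    (∀ y ∈ gpu, (runTable gpu).getD y 0 = (runTable gpu).getD (y + 1) 0 + 1) ∧
    (∀ (y v : Int), (runTable gpu).get? y = some v → 1 ≤ v) := by
  have hsnd : (PySem.List.sorted gpu (fun x => x) true).Nodup :=
    ((PySem.List.sorted_perm gpu (fun x => x) true).nodup_iff).mpr hnd
  have hle : List.Pairwise (fun a b : Int => b ≤ a) (PySem.List.sorted gpu (fun x => x) true) :=
    PySem.List.sorted_pairwise_rev gpu (fun x => x)
  have hdec : List.Pairwise (fun a b : Int => b < a) (PySem.List.sorted gpu (fun x => x) true) := by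
    have hne : List.Pairwise (fun a b : Int => a ≠ b) (PySem.List.sorted gpu (fun x => x) true) := hsnd
    exact (hle.and hne).imp (fun h => lt_of_le_of_ne h.1 (Ne.symm h.2))
  have := run_fold_inv gpu (PySem.List.sorted gpu (fun x => x) true) PySem.Dict.empty
    (fun y hy => (PySem.List.mem_sorted gpu (fun x => x) true y).mp hy)
    hdec
    (fun y => by simp [PySem.Dict.get?_empty, PySem.List.mem_sorted])
    (fun y hyG hyL => absurd ((PySem.List.mem_sorted gpu (fun x => x) true y).mpr hyG) hyL)
    (fun y hyG hyL => absurd ((PySem.List.mem_sorted gpu (fun x => x) true y).mpr hyG) hyL)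
    (fun y v hv => by simp [PySem.Dict.get?_empty] at hv)
  exact this

theorem runTable_getD_nonneg (gpu : List Int) (hnd : gpu.Nodup) (y : Int) :
    0 ≤ (runTable gpu).getD y 0 := by
  rw [PySem.Dict.getD_eq_get?_getD]
  cases h : (runTable gpu).get? y with
  | none => simp
  | some v =>
    have := (runTable_props gpu hnd).2.2 y v h
    simp only [Option.getD_some]; omega

theorem runTable_streak (gpu : List Int) (hnd : gpu.Nodup) :
    ∀ (n : Nat) (x : Int),
      ((n : Int) ≤ (runTable gpu).getD x 0) ↔ (∀ b : Int, x ≤ b → b < x + n → b ∈ gpu) := by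
  intro n
  induction n with
  | zero =>
    intro x
    constructor
    · intro _ b hb1 hb2; omega
    · intro _; simpa using runTable_getD_nonneg gpu hnd x
  | succ n ih =>
    intro x
    obtain ⟨hmem, hrec, hpos⟩ := runTable_props gpu hnd
    constructor
    · intro h b hb1 hb2
      have hxg : x ∈ gpu := by
        by_contra hx
        have : ((runTable gpu).get? x).isSome = false := by
          cases hh : (runTable gpu).get? x with
          | none => rfl
          | some v => exact absurd ((hmem x).mp (by simp [hh])) hx
        have hz : (runTable gpu).getD x 0 = 0 := by
          rw [PySem.Dict.getD_eq_get?_getD]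
          cases hh : (runTable gpu).get? x with
          | none => simp
          | some v => simp [hh] at this
        rw [hz] at h; push_cast at h; omega
      have hstep := hrec x hxg
      have hnext : (n : Int) ≤ (runTable gpu).getD (x + 1) 0 := by
        rw [hstep] at h; push_cast at h ⊢; omega
      rcases eq_or_lt_of_le hb1 with hbe | hbl
      · exact hbe ▸ hxg
      · exact (ih (x + 1)).mp hnext b (by omega) (by push_cast at hb2 ⊢; omega)
    · intro h
      have hxg : x ∈ gpu := h x le_rfl (by push_cast; omega)
      have hnext : (n : Int) ≤ (runTable gpu).getD (x + 1) 0 :=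
        (ih (x + 1)).mpr (fun b hb1 hb2 => h b (by omega) (by push_cast at hb2 ⊢; omega))
      rw [hrec x hxg]; push_cast; omega

theorem cond_iff (gpu : List Int) (hnd : gpu.Nodup) (num start : Int) (hs : start ∈ gpu) :
    (num ≤ (runTable gpu).getD start 0) ↔
      PySem.Set.issubset (PySem.Set.ofList (PySem.List.pyRange start (start + num) 1)) gpu = true := by
  rw [PySem.Set.issubset_iff]
  have hmemiff : ∀ b : Int, b ∈ PySem.Set.ofList (PySem.List.pyRange start (start + num) 1) ↔
      (start ≤ b ∧ b < start + num) := by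
    intro b
    rw [PySem.Set.mem_ofList, PySem.List.mem_pyRange_one]
  by_cases hn : num ≤ 0
  · constructor
    · intro _ b hb
      rw [hmemiff b] at hb; omega
    · intro _
      have h1 : ((runTable gpu).get? start).isSome = true := ((runTable_props gpu hnd).1 start).mpr hs
      cases hh : (runTable gpu).get? start with
      | none => rw [hh] at h1; simp at h1
      | some v =>
        have := (runTable_props gpu hnd).2.2 start v hh
        rw [PySem.Dict.getD_eq_get?_getD, hh]
        simp only [Option.getD_some]; omega
  · have hcast : ((num.toNat : Int)) = num := Int.toNat_of_nonneg (by omega)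
    have := runTable_streak gpu hnd num.toNat start
    rw [hcast] at this
    rw [this]
    constructor
    · intro hall b hb
      rw [hmemiff b] at hb
      exact hall b hb.1 hb.2
    · intro hall b hb1 hb2
      exact hall b ((hmemiff b).mpr ⟨hb1, hb2⟩)

theorem folds_eq (gpu : List Int) (hnd : gpu.Nodup) (num : Int) :
    ∀ (L : List Int) (acc : List (List Int)), (∀ s ∈ L, s ∈ gpu) →
      L.foldl (fun result start =>
        if PySem.Set.issubset (PySem.Set.ofList (PySem.List.pyRange start (start + num) 1)) gpu then
          result ++ [PySem.Set.ofList (PySem.List.pyRange start (start + num) 1)]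
        else result) acc
      = L.foldl (fun result start =>
        if num ≤ (runTable gpu).getD start 0 then
          result ++ [PySem.Set.ofList (PySem.List.pyRange start (start + num) 1)]
        else result) acc := by
  intro L
  induction L with
  | nil => intro acc _; rfl
  | cons s rest ih =>
    intro acc hL
    have hs : s ∈ gpu := hL s (by simp)
    have hiff := cond_iff gpu hnd num s hs
    simp only [List.foldl_cons]
    have hstep : (if PySem.Set.issubset (PySem.Set.ofList (PySem.List.pyRange s (s + num) 1)) gpu then
          acc ++ [PySem.Set.ofList (PySem.List.pyRange s (s + num) 1)] else acc)
        = (if num ≤ (runTable gpu).getD s 0 then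
          acc ++ [PySem.Set.ofList (PySem.List.pyRange s (s + num) 1)] else acc) := by
      by_cases hc : num ≤ (runTable gpu).getD s 0
      · rw [if_pos hc, if_pos (hiff.mp hc)]
      · rw [if_neg hc, if_neg (fun hb => hc (hiff.mpr hb))]
    rw [hstep]
    exact ih _ (fun t ht => hL t (by simp [ht]))

-- ===== VERDICT (by name: the statement is the Claim_ definition above) =====
theorem find_gpu_blocks_spec : Claim_equal_find_gpu_blocks := by
  intro profile gpu _hdom hpre
  unfold Spec_find_gpu_blocks
  simp only [find_gpu_blocks, find_gpu_blocks_alt]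
  exact folds_eq gpu hpre profile.2 gpu [] (fun s hs => hs)
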